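-- pv_equiv track=rewrite | github.com/jbrry/coding-practice | codility/convert_decimal_to_hexspeak.py | solution
-- ===== SOURCE A (Python) =====
-- def solution(S):
--     """
--     Inputs:
--         `S` a string encoding a decimal integer `N`.
--
--     Returns:
--         `output_string`: Hexspeak representation of N if output_string is a valid Hexspeak word,
--         otherwise return "ERROR".
--     """
--     # Hexspeak dictionary
--     d = {0: "O", 1: "I", 10: "A", 11: "B", 12: "C", 13: "D", 14: "E", 15: "F"}
--
--     def get_divmod(q):
--         """Divides the number by 16 and returns the integer quotient and remainder."""
--         q, mod = divmod(q, 16)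
--         return q, mod
--
--     def get_remainders(q):
--         if q == 0:
--             return []
--         q, mod = get_divmod(q)
--         return [mod] + get_remainders(q)
--
--     q = int(S)
--     remainders = get_remainders(q)
--     output_string = ""
--     # go through remainders in reverse and access string value from alphabet
--     while remainders:
--         r = remainders.pop()
--         if r not in d:
--             return "ERROR"
--         else:
--             output_string += d[r]
--     return output_string
-- ===== SOURCE B (Python) =====
-- def solution(S):
--     """Closed-form rewrite: get the hex digit characters from format(q, 'x')
--     and map each through a char->hexspeak-letter table, returning "ERROR" as
--     soon as some character (e.g. '2'..'9') has no letter; q == 0 gives ''."""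
--     table = {'0': 'O', '1': 'I', 'a': 'A', 'b': 'B', 'c': 'C', 'd': 'D', 'e': 'E', 'f': 'F'}
--     q = int(S)
--     hx = format(q, 'x') if q else ''
--     if any(c not in table for c in hx):
--         return "ERROR"
--     return ''.join(table[c] for c in hx)
-- ===== Notes on version B (the rewrite author's own statement) =====
-- stated objective: alternative
-- what changed: Replaces A's recursive remainder-list construction and pop-and-concatenate loop by formatting the number as a hex string (format(q,'x')) and mapping each character through a char-to-letter table.
-- outside the precondition, e.g. on solution('x'): A raises ValueError, B raises ValueError; on solution('-1'): A raises RecursionError, B returns 'ERROR'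
import Mathlib
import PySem

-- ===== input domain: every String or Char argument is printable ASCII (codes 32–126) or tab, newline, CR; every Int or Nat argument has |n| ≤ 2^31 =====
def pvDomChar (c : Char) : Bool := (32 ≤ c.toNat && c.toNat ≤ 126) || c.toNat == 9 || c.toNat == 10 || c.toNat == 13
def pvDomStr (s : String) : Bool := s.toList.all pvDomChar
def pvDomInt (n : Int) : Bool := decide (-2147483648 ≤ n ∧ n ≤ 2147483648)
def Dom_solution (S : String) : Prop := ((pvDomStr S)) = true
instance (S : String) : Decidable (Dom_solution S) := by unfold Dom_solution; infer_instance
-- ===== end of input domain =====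

-- B replaces A's recursive remainder list + pop-and-concatenate loop by formatting
-- the number as a hex string and mapping each character through a char→letter table
-- (objective: alternative algorithm, same cost).

-- ===== PORT A =====
-- the hexspeak dictionary d
def hexDict : PySem.Dict Int String :=
  PySem.Dict.ofList [(0,"O"),(1,"I"),(10,"A"),(11,"B"),(12,"C"),(13,"D"),(14,"E"),(15,"F")]

-- get_remainders (get_divmod inlined as its divmod call); exact for q ≥ 0
-- (for q < 0 the Python recurses forever — such inputs are outside Pre_solution)
def getRemainders (q : Int) : List Int :=
  if _h : q ≤ 0 then []
  else PySem.Int.mod q 16 :: getRemainders (PySem.Int.floordiv q 16)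
termination_by q.toNat
decreasing_by
  rw [PySem.Int.floordiv_eq_ediv_of_pos (by norm_num)]
  omega

-- the `while remainders:` loop; popping from the end = walking the reversed list
def popLoopA : List Int → String → String
  | [], acc => acc
  | r :: rest, acc =>
    match hexDict.get? r with
    | none => "ERROR"
    | some c => popLoopA rest (acc ++ c)

def solution (S : String) : String :=
  match PySem.Int.ofStr? S with
  | none => ""   -- int(S) raises ValueError; outside Pre_solution
  | some q => popLoopA (getRemainders q).reverse ""

-- ===== PORT B =====
-- the char → hexspeak-letter table
def hexTable : PySem.Dict Char String :=
  PySem.Dict.ofList [('0',"O"),('1',"I"),('a',"A"),('b',"B"),('c',"C"),('d',"D"),('e',"E"),('f',"F")]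

def solution_alt (S : String) : String :=
  match PySem.Int.ofStr? S with
  | none => ""   -- int(S) raises ValueError; outside Pre_solution
  | some q =>
    -- hx = format(q, 'x') if q else '' ; format(q,'x') is library hex formatting,
    -- ported as Nat.toDigits 16 (with Python's '-' sign for negative q)
    let hx : List Char :=
      if q = 0 then []
      else if q < 0 then '-' :: Nat.toDigits 16 (-q).toNat
      else Nat.toDigits 16 q.toNat
    if hx.any (fun c => (hexTable.get? c).isNone) then "ERROR"
    else PySem.Str.join "" (hx.map (fun c => (hexTable.get? c).getD ""))

-- ===== PRECONDITION & SPEC =====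
-- Pre_ excludes exactly the inputs where A raises: strings int() rejects (ValueError)
-- and negative numbers (unbounded recursion, RecursionError).
def Pre_solution (S : String) : Prop := 0 ≤ (PySem.Int.ofStr? S).getD (-1)
instance (S : String) : Decidable (Pre_solution S) := by unfold Pre_solution; infer_instance

def pvWitness_solution : String := "490"

def Spec_solution (S : String) (out : String) : Prop := out = solution_alt S
instance (S : String) (out : String) : Decidable (Spec_solution S out) := by unfold Spec_solution; infer_instance

-- ===== CLAIM (what is proved, stated in full; the proofs are below) =====
def Claim_equal_solution : Prop := ∀ (S : String), Dom_solution S → Pre_solution S → Spec_solution S (solution S)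

-- ===== LEMMAS AND PROOFS =====

def goodDigit (r : Int) : Bool := (hexDict.get? r).isSome

def strOf : List Int → String
  | [] => ""
  | r :: rest => (hexDict.get? r).getD "" ++ strOf rest

theorem popLoopA_eq (l : List Int) (acc : String) :
    popLoopA l acc = if l.all goodDigit then acc ++ strOf l else "ERROR" := by
  induction l generalizing acc with
  | nil => simp [popLoopA, strOf]
  | cons r rest ih =>
    cases h : hexDict.get? r with
    | none => simp [popLoopA, h, goodDigit]
    | some c => simp [popLoopA, h, ih, goodDigit, strOf, String.append_assoc]

-- base-16 remainders of a Nat, least significant first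
def remN (n : Nat) : List Nat :=
  if n = 0 then [] else n % 16 :: remN (n / 16)
decreasing_by exact Nat.div_lt_self (by omega) (by norm_num)

theorem remN_lt (n : Nat) : ∀ r ∈ remN n, r < 16 := by
  induction n using Nat.strong_induction_on with
  | _ n ih =>
    rw [remN]
    split
    · simp
    · next h =>
      intro r hr
      rcases List.mem_cons.mp hr with h1 | h1
      · omega
      · exact ih (n / 16) (Nat.div_lt_self (by omega) (by norm_num)) r h1

theorem getRemainders_natCast (n : Nat) :
    getRemainders (n : Int) = (remN n).map Int.ofNat := by
  induction n using Nat.strong_induction_on with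
  | _ n ih =>
    rw [getRemainders, remN]
    by_cases h : n = 0
    · simp [h]
    · have h1 : ¬ ((n : Int) ≤ 0) := by omega
      have h2 : PySem.Int.floordiv (n : Int) 16 = ((n / 16 : Nat) : Int) := by
          simpa using PySem.Int.floordiv_natCast n 16
      simp only [h1, dite_false, h, if_false]
      rw [h2, ih (n / 16) (Nat.div_lt_self (by omega) (by norm_num))]
      simp

-- the two tables agree on every base-16 digit
theorem tables_agree (r : Nat) (h : r < 16) :
    hexDict.get? (Int.ofNat r) = hexTable.get? (Nat.digitChar r) := by
  interval_cases r <;> decide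

theorem all_good_eq (l : List Nat) (h : ∀ r ∈ l, r < 16) :
    (l.map Int.ofNat).all goodDigit
      = !((l.map Nat.digitChar).any (fun c => (hexTable.get? c).isNone)) := by
  induction l with
  | nil => simp
  | cons r rest ih =>
    have hr := tables_agree r (h r (by simp))
    simp only [List.map_cons, List.all_cons, List.any_cons, Bool.not_or,
      ih (fun x hx => h x (List.mem_cons_of_mem _ hx)), goodDigit]
    rw [hr]
    cases hexTable.get? (Nat.digitChar r) <;> simp

theorem join_empty_cons (s : String) (l : List String) :
    PySem.Str.join "" (s :: l) = s ++ PySem.Str.join "" l := by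
  apply String.toList_inj.mp
  simp [PySem.Str.toList_join, PySem.Chars.join]
  cases l <;> simp [List.intercalate]

theorem strOf_eq_join (l : List Nat) (h : ∀ r ∈ l, r < 16) :
    strOf (l.map Int.ofNat)
      = PySem.Str.join "" ((l.map Nat.digitChar).map (fun c => (hexTable.get? c).getD "")) := by
  induction l with
  | nil => simp [strOf, PySem.Str.join]
  | cons r rest ih =>
    have hr := tables_agree r (h r (by simp))
    rw [List.map_cons, strOf, ih (fun x hx => h x (List.mem_cons_of_mem _ hx)), hr,
      List.map_cons, List.map_cons, join_empty_cons]

-- Nat.toDigits produces exactly the reversed remainder characters (n > 0)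
theorem toDigitsCore_eq (fuel : Nat) :
    ∀ (n : Nat) (acc : List Char), 0 < n → n < fuel →
      Nat.toDigitsCore 16 fuel n acc = ((remN n).map Nat.digitChar).reverse ++ acc := by
  induction fuel with
  | zero => intro n acc h1 h2; omega
  | succ fuel ih =>
    intro n acc h1 _h2
    rw [Nat.toDigitsCore, remN]
    simp only [Nat.pos_iff_ne_zero.mp h1, if_false]
    by_cases h : n / 16 = 0
    · rw [if_pos h, h, remN]
      simp
    · rw [if_neg h, ih (n / 16) _ (by omega) (by
        have := Nat.div_lt_self (by omega : 0 < n) (by norm_num : 1 < 16); omega)]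
      simp

theorem toDigits_eq (n : Nat) (h : 0 < n) :
    Nat.toDigits 16 n = ((remN n).map Nat.digitChar).reverse := by
  rw [Nat.toDigits, toDigitsCore_eq (n + 1) n [] h (by omega)]
  simp

-- ===== VERDICT (by name: the statement is the Claim_ definition above) =====
theorem if_key (l : List Nat) (hl : ∀ r ∈ l, r < 16) :
    (if (l.map Int.ofNat).all goodDigit then "" ++ strOf (l.map Int.ofNat) else "ERROR")
      = (if (l.map Nat.digitChar).any (fun c => (hexTable.get? c).isNone) then "ERROR"
         else PySem.Str.join "" ((l.map Nat.digitChar).map (fun c => (hexTable.get? c).getD ""))) := by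
  rw [all_good_eq l hl, strOf_eq_join l hl]
  cases hb : (l.map Nat.digitChar).any (fun c => (hexTable.get? c).isNone) <;> simp

theorem solution_spec : Claim_equal_solution := by
  intro S _hDom hPre
  unfold Spec_solution solution solution_alt
  cases h : PySem.Int.ofStr? S with
  | none => simp [Pre_solution, h] at hPre
  | some q =>
    have hq : 0 ≤ q := by simp [Pre_solution, h] at hPre; exact hPre
    by_cases h0 : q = 0
    · subst h0
      show popLoopA (getRemainders 0).reverse "" = _
      rw [getRemainders]
      simp [popLoopA, PySem.Str.join]
    · have hcast : q = (q.toNat : Int) := by omega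
      have hpos : 0 < q.toNat := by omega
      have hn0 : ¬((q.toNat : Int) = 0) := by omega
      have hnneg : ¬((q.toNat : Int) < 0) := by omega
      have hmem' : ∀ r ∈ (remN q.toNat).reverse, r < 16 := by
        intro r hr; exact remN_lt q.toNat r (List.mem_reverse.mp hr)
      show popLoopA (getRemainders q).reverse "" = _
      rw [hcast]
      simp only [if_neg hn0, if_neg hnneg, Int.toNat_natCast]
      rw [getRemainders_natCast, popLoopA_eq, toDigits_eq q.toNat hpos,
        ← List.map_reverse, ← List.map_reverse]
      exact if_key ((remN q.toNat).reverse) hmem'
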